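-- pv_equiv track=rewrite | github.com/Leonenkk/AOIS | lab1/main.py | multiply_in_direct_code
-- ===== SOURCE A (Python) =====
-- def decimal_to_binary(n, bit_length=None):
--     """Перевод неотрицательного целого числа в двоичную строку (без знака)"""
--     if n == 0:
--         return '0'.zfill(bit_length) if bit_length else '0'
--     binary = []
--     while n > 0:
--         binary.append(str(n % 2))
--         n //= 2
--     binary_str = ''.join(reversed(binary))
--     if bit_length:
--         binary_str = binary_str.zfill(bit_length)
--     return binary_str
--
-- def binary_add(a, b):
--     """
--     Сложение двух двоичных чисел, заданных в виде строк (без знака).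
--     Возвращает строку с результатом.
--     """
--     max_len = max(len(a), len(b))
--     a = a.zfill(max_len)
--     b = b.zfill(max_len)
--     carry = 0
--     result = ""
--     for i in range(max_len - 1, -1, -1):
--         sum_bit = (1 if a[i] == '1' else 0) + (1 if b[i] == '1' else 0) + carry
--         result = ('1' if sum_bit % 2 == 1 else '0') + result
--         carry = 1 if sum_bit >= 2 else 0
--     if carry:
--         result = '1' + result
--     return result
--
-- def multiply_in_direct_code(a, b, bit_length):
--     """
--     Умножение двух чисел в прямом (знаковом) коде.
--     """
--     sign_a = '0' if a >= 0 else '1'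
--     sign_b = '0' if b >= 0 else '1'
--     mag_a = decimal_to_binary(abs(a), bit_length - 1)
--     mag_b = decimal_to_binary(abs(b), bit_length - 1)
--
--     product = "0"
--     for i in range(len(mag_b) - 1, -1, -1):
--         if mag_b[i] == '1':
--             partial = mag_a + "0" * (len(mag_b) - 1 - i)
--             product = binary_add(product, partial)
--     if len(product) > bit_length - 1:
--         product = product[-(bit_length - 1):]
--     else:
--         product = product.zfill(bit_length - 1)
--
--     result_sign = '0' if sign_a == sign_b else '1'
--     return result_sign + product
-- ===== SOURCE B (Python) =====
-- def multiply_in_direct_code(a, b, bit_length):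
--     width = bit_length - 1
--     magnitude = (abs(a) * abs(b)) % (1 << width)
--     sign = '0' if (a >= 0) == (b >= 0) else '1'
--     return sign + format(magnitude, 'b').zfill(width)
-- ===== Notes on version B (the rewrite author's own statement) =====
-- stated objective: faster
-- what changed: Replaces the string shift-and-add multiplier (per-bit binary_add over zero-padded strings) by one native integer multiply followed by a modulo-2^(bit_length-1) truncation and a single binary formatting of the result.
-- intended difference: For bit_length = 1 the slice product[-(bit_length-1):] is product[-0:], the whole string, so A returns the sign followed by the full untruncated product whenever that product string is not '0'; B returns sign + '0' (the product modulo 2^0), the intended 0-magnitude-bit truncation. — e.g. on multiply_in_direct_code(3, 2, 1): A returns "0110", B returns "00"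
-- outside the precondition, e.g. on multiply_in_direct_code(5, -3, 0): A returns '1111', B raises ValueError
import Mathlib
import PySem

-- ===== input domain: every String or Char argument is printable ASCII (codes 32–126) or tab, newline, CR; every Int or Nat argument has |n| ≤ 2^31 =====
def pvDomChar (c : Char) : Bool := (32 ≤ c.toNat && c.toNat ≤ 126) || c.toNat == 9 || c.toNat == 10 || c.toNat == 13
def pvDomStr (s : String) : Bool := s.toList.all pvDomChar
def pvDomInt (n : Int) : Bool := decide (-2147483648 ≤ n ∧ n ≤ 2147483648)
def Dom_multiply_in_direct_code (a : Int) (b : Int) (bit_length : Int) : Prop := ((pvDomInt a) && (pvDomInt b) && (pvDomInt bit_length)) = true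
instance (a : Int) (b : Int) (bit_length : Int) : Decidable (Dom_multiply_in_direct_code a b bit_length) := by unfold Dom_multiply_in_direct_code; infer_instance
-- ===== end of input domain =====

-- B replaces A's string shift-and-add multiplier by one native integer multiply, a modulo-2^(bit_length-1)
-- truncation and a single binary formatting (objective: faster).

-- ===== PORT A =====
-- str.zfill(k): pad with leading '0' to length k (no-op for k ≤ len, including negative k)
def pvZfill (k : Int) (s : List Char) : List Char :=
  List.replicate (k.toNat - s.length) '0' ++ s

def pvBit (c : Char) : Nat := if c = '1' then 1 else 0

-- the `while n > 0: binary.append(str(n % 2)); n //= 2` loop (digits appended LSB-first)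
def pvD2bLoop (n : Nat) (acc : List Char) : List Char :=
  if h : n = 0 then acc
  else pvD2bLoop (n / 2) (acc ++ [if n % 2 = 1 then '1' else '0'])
decreasing_by exact Nat.div_lt_self (Nat.pos_of_ne_zero h) (by omega)

-- decimal_to_binary(n, bit_length); A only calls it with n = abs(...) ≥ 0, so n : Nat; truthiness of bit_length = (≠ 0)
def decimal_to_binary (n : Nat) (bl : Int) : List Char :=
  if n = 0 then (if bl ≠ 0 then pvZfill bl ['0'] else ['0'])
  else
    let binary_str := (pvD2bLoop n []).reverse
    if bl ≠ 0 then pvZfill bl binary_str else binary_str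

-- one step of binary_add's `for i in range(max_len-1,-1,-1)` loop (LSB first, result built by prepending)
def pvAddStep (st : List Char × Nat) (p : Char × Char) : List Char × Nat :=
  let s := pvBit p.1 + pvBit p.2 + st.2
  ((if s % 2 = 1 then '1' else '0') :: st.1, if s ≥ 2 then 1 else 0)

def binary_add (a b : List Char) : List Char :=
  let max_len := max a.length b.length
  let a' := pvZfill (max_len : Int) a
  let b' := pvZfill (max_len : Int) b
  let rc := (a'.reverse.zip b'.reverse).foldl pvAddStep ([], 0)
  if rc.2 ≠ 0 then '1' :: rc.1 else rc.1

-- the `for i in range(len(mag_b)-1,-1,-1)` loop: i descending = mag_b reversed, shift = len(mag_b)-1-i ascending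
def pvMulLoop (ma : List Char) (rb : List Char) (shift : Nat) (product : List Char) : List Char :=
  match rb with
  | [] => product
  | c :: cs =>
      pvMulLoop ma cs (shift + 1)
        (if c = '1' then binary_add product (ma ++ List.replicate shift '0') else product)

def multiply_in_direct_code (a : Int) (b : Int) (bit_length : Int) : String :=
  let sign_a : Char := if 0 ≤ a then '0' else '1'
  let sign_b : Char := if 0 ≤ b then '0' else '1'
  let mag_a := decimal_to_binary a.natAbs (bit_length - 1)
  let mag_b := decimal_to_binary b.natAbs (bit_length - 1)
  let product := pvMulLoop mag_a mag_b.reverse 0 ['0']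
  let product :=
    if (product.length : Int) > bit_length - 1 then
      PySem.List.slice product (some (-(bit_length - 1))) none
    else pvZfill (bit_length - 1) product
  let result_sign : Char := if sign_a = sign_b then '0' else '1'
  String.mk (result_sign :: product)

-- ===== PORT B =====
-- format(m, 'b') for m > 0 (MSB-first, no leading zeros)
def pvToBinLoop (m : Nat) : List Char :=
  if h : m = 0 then []
  else pvToBinLoop (m / 2) ++ [if m % 2 = 1 then '1' else '0']
decreasing_by exact Nat.div_lt_self (Nat.pos_of_ne_zero h) (by omega)

def pvFormatB (m : Nat) : List Char := if m = 0 then ['0'] else pvToBinLoop m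

def multiply_in_direct_code_alt (a : Int) (b : Int) (bit_length : Int) : String :=
  let width := bit_length - 1
  let magnitude := (a.natAbs * b.natAbs) % 2 ^ width.toNat
  let sign : Char := if (decide (0 ≤ a)) = (decide (0 ≤ b)) then '0' else '1'
  String.mk (sign :: pvZfill width (pvFormatB magnitude))

-- ===== PRECONDITION & SPEC =====
-- Pre_ excludes bit_length ≤ 0, where B's shift `1 << (bit_length - 1)` raises ValueError while A returns a string.
def Pre_multiply_in_direct_code (a : Int) (b : Int) (bit_length : Int) : Prop := 1 ≤ bit_length
instance (a : Int) (b : Int) (bit_length : Int) : Decidable (Pre_multiply_in_direct_code a b bit_length) := by unfold Pre_multiply_in_direct_code; infer_instance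
def pvWitness_multiply_in_direct_code : Int × Int × Int := (3, -2, 5)

-- For bit_length = 1 the slice product[-(bit_length-1):] is product[-0:], the whole string, so A returns the sign
-- followed by the full untruncated product whenever that product string is not '0'; B returns sign + '0'
-- (the product modulo 2^0), the intended 0-magnitude-bit truncation.
def D_multiply_in_direct_code (a : Int) (b : Int) (bit_length : Int) : Prop :=
  bit_length = 1 ∧ b ≠ 0 ∧ ¬(a = 0 ∧ (b = 1 ∨ b = -1))
instance (a : Int) (b : Int) (bit_length : Int) : Decidable (D_multiply_in_direct_code a b bit_length) := by unfold D_multiply_in_direct_code; infer_instance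

def Spec_multiply_in_direct_code (a : Int) (b : Int) (bit_length : Int) (out : String) : Prop :=
  ¬ D_multiply_in_direct_code a b bit_length → out = multiply_in_direct_code_alt a b bit_length
instance (a : Int) (b : Int) (bit_length : Int) (out : String) : Decidable (Spec_multiply_in_direct_code a b bit_length out) := by unfold Spec_multiply_in_direct_code; infer_instance

def pvDiffWitness_multiply_in_direct_code : Int × Int × Int := (3, 2, 1)
def pvDiffWitnessOut_multiply_in_direct_code : String × String := ("0110", "00")

-- ===== CLAIM (what is proved, stated in full; the proofs are below) =====
def Claim_unchanged_multiply_in_direct_code : Prop := ∀ (a : Int) (b : Int) (bit_length : Int), Dom_multiply_in_direct_code a b bit_length → Pre_multiply_in_direct_code a b bit_length → Spec_multiply_in_direct_code a b bit_length (multiply_in_direct_code a b bit_length)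
def Claim_changed_multiply_in_direct_code : Prop := Dom_multiply_in_direct_code (pvDiffWitness_multiply_in_direct_code.1) (pvDiffWitness_multiply_in_direct_code.2.1) (pvDiffWitness_multiply_in_direct_code.2.2) ∧ Pre_multiply_in_direct_code (pvDiffWitness_multiply_in_direct_code.1) (pvDiffWitness_multiply_in_direct_code.2.1) (pvDiffWitness_multiply_in_direct_code.2.2) ∧ D_multiply_in_direct_code (pvDiffWitness_multiply_in_direct_code.1) (pvDiffWitness_multiply_in_direct_code.2.1) (pvDiffWitness_multiply_in_direct_code.2.2) ∧ multiply_in_direct_code (pvDiffWitness_multiply_in_direct_code.1) (pvDiffWitness_multiply_in_direct_code.2.1) (pvDiffWitness_multiply_in_direct_code.2.2) = pvDiffWitnessOut_multiply_in_direct_code.1 ∧ multiply_in_direct_code_alt (pvDiffWitness_multiply_in_direct_code.1) (pvDiffWitness_multiply_in_direct_code.2.1) (pvDiffWitness_multiply_in_direct_code.2.2) = pvDiffWitnessOut_multiply_in_direct_code.2 ∧ pvDiffWitnessOut_multiply_in_direct_code.1 ≠ pvDiffWitnessOut_multiply_in_direct_code.2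
def Claim_exact_multiply_in_direct_code : Prop := ∀ (a : Int) (b : Int) (bit_length : Int), Dom_multiply_in_direct_code a b bit_length → Pre_multiply_in_direct_code a b bit_length → D_multiply_in_direct_code a b bit_length → multiply_in_direct_code a b bit_length ≠ multiply_in_direct_code_alt a b bit_length

-- ===== LEMMAS AND PROOFS =====

-- value of a bit string, LSB first
def pvValR : List Char → Nat
  | [] => 0
  | c :: cs => pvBit c + 2 * pvValR cs

-- value of a bit string, MSB first (as written)
def pvVal (s : List Char) : Nat := pvValR s.reverse

def pvBitsOk (s : List Char) : Prop := ∀ c ∈ s, c = '0' ∨ c = '1'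

-- the LSB-first digit list of n
def pvDigs (n : Nat) : List Char := pvD2bLoop n []

-- fixed-width w, MSB-first representation of v mod 2^w
def pvFix : Nat → Nat → List Char
  | 0, _ => []
  | w + 1, v => pvFix w (v / 2) ++ [if v % 2 = 1 then '1' else '0']

theorem pvBit_le (c : Char) : pvBit c ≤ 1 := by unfold pvBit; split <;> omega

theorem pvModPowSucc (v w : Nat) : v % 2 ^ (w+1) = 2 * (v / 2 % 2 ^ w) + v % 2 := by
  have hM : 0 < 2 ^ w := Nat.two_pow_pos w
  have hq : v / 2 % 2 ^ w < 2 ^ w := Nat.mod_lt _ hM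
  have hr : v % 2 % (2 * 2 ^ w) = v % 2 := Nat.mod_eq_of_lt (by omega)
  have hv : v = 2 * (v / 2) + v % 2 := by omega
  calc v % 2 ^ (w+1) = (2 * (v / 2) + v % 2) % (2 * 2 ^ w) := by rw [← hv, pow_succ, mul_comm]
    _ = (2 * (v / 2) % (2 * 2 ^ w) + v % 2 % (2 * 2 ^ w)) % (2 * 2 ^ w) := by rw [Nat.add_mod]
    _ = (2 * (v / 2 % 2 ^ w) + v % 2) % (2 * 2 ^ w) := by rw [Nat.mul_mod_mul_left, hr]
    _ = 2 * (v / 2 % 2 ^ w) + v % 2 := Nat.mod_eq_of_lt (by omega)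

theorem pvDivPowZero (S w : Nat) (h : S / 2 ^ w = 0) : S < 2 ^ w := by
  have hM : 0 < 2 ^ w := Nat.two_pow_pos w
  have h1 := Nat.div_add_mod S (2 ^ w)
  rw [h, Nat.mul_zero, Nat.zero_add] at h1
  have h2 : S % 2 ^ w < 2 ^ w := Nat.mod_lt S hM
  omega

theorem pvValR_append (xs ys : List Char) :
    pvValR (xs ++ ys) = pvValR xs + 2 ^ xs.length * pvValR ys := by
  induction xs with
  | nil => simp [pvValR]
  | cons c cs ih => simp [pvValR, ih, pow_succ]; ring

theorem pvVal_append (xs ys : List Char) :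
    pvVal (xs ++ ys) = pvVal xs * 2 ^ ys.length + pvVal ys := by
  simp [pvVal, List.reverse_append, pvValR_append]; ring

theorem pvVal_cons (c : Char) (cs : List Char) :
    pvVal (c :: cs) = pvBit c * 2 ^ cs.length + pvVal cs := by
  have : c :: cs = [c] ++ cs := rfl
  rw [this, pvVal_append]
  simp [pvVal, pvValR]

theorem pvValR_lt (s : List Char) : pvValR s < 2 ^ s.length := by
  induction s with
  | nil => simp [pvValR]
  | cons c cs ih =>
      have hc := pvBit_le c
      simp only [pvValR, List.length_cons, pow_succ]
      omega

theorem pvVal_lt (s : List Char) : pvVal s < 2 ^ s.length := by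
  simpa [pvVal] using pvValR_lt s.reverse

theorem pvValR_ext (s : List Char) : ∀ (t : List Char), pvBitsOk s → pvBitsOk t →
    s.length = t.length → pvValR s = pvValR t → s = t := by
  induction s with
  | nil => intro t _ _ hl _; cases t with
    | nil => rfl
    | cons d ds => simp at hl
  | cons c cs ih =>
      intro t hs ht hl hv
      cases t with
      | nil => simp at hl
      | cons d ds =>
          have hc := hs c (by simp)
          have hd := ht d (by simp)
          simp only [pvValR] at hv
          simp only [List.length_cons] at hl
          have hbc := pvBit_le c
          have hbd := pvBit_le d
          have hbit : pvBit c = pvBit d := by omega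
          have hcd : c = d := by
            rcases hc with rfl | rfl <;> rcases hd with rfl | rfl <;>
              simp [pvBit] at hbit ⊢
          subst hcd
          have : pvValR cs = pvValR ds := by omega
          rw [ih ds (fun x hx => hs x (by simp [hx])) (fun x hx => ht x (by simp [hx]))
            (by omega) this]

theorem pvBitsOk_reverse (s : List Char) (h : pvBitsOk s) : pvBitsOk s.reverse := by
  intro c hc; exact h c (List.mem_reverse.mp hc)

theorem pvVal_ext (s t : List Char) (hs : pvBitsOk s) (ht : pvBitsOk t)
    (hl : s.length = t.length) (hv : pvVal s = pvVal t) : s = t := by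
  have := pvValR_ext s.reverse t.reverse (pvBitsOk_reverse s hs) (pvBitsOk_reverse t ht)
    (by simpa using hl) hv
  exact List.reverse_injective this

theorem pvValR_replicate_zero (m : Nat) : pvValR (List.replicate m '0') = 0 := by
  induction m with
  | zero => rfl
  | succ k ih => simp [List.replicate_succ, pvValR, ih, pvBit]

theorem pvZfill_spec (k : Int) (s : List Char) (hs : pvBitsOk s) :
    pvBitsOk (pvZfill k s) ∧ pvVal (pvZfill k s) = pvVal s ∧
      (pvZfill k s).length = max k.toNat s.length := by
  unfold pvZfill
  refine ⟨?_, ?_, ?_⟩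
  · intro c hc
    rcases List.mem_append.mp hc with h | h
    · left; exact (List.eq_of_mem_replicate h)
    · exact hs c h
  · rw [pvVal_append]
    have : pvVal (List.replicate (k.toNat - s.length) '0') = 0 := by
      simp [pvVal, List.reverse_replicate, pvValR_replicate_zero]
    rw [this]; ring
  · simp [List.length_append, List.length_replicate]; omega

theorem pvD2bLoop_acc (n : Nat) : ∀ (acc : List Char), pvD2bLoop n acc = acc ++ pvDigs n := by
  induction n using Nat.strong_induction_on with
  | _ n ih =>
    intro acc
    by_cases hn : n = 0
    · subst hn
      show pvD2bLoop 0 acc = acc ++ pvD2bLoop 0 []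
      simp [pvD2bLoop]
    · have hlt : n / 2 < n := Nat.div_lt_self (Nat.pos_of_ne_zero hn) (by omega)
      have l1 : pvD2bLoop n acc = pvD2bLoop (n / 2) (acc ++ [if n % 2 = 1 then '1' else '0']) := by
        rw [pvD2bLoop]; simp [hn]
      have l2 : pvDigs n = pvD2bLoop (n / 2) [if n % 2 = 1 then '1' else '0'] := by
        rw [pvDigs]; rw [pvD2bLoop]; simp [hn]
      rw [l1, ih (n / 2) hlt, l2, ih (n / 2) hlt]
      simp

theorem pvDigs_cons (n : Nat) (h : n ≠ 0) :
    pvDigs n = (if n % 2 = 1 then '1' else '0') :: pvDigs (n / 2) := by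
  rw [pvDigs, pvD2bLoop]
  simp only [h, dite_false]
  rw [pvD2bLoop_acc]
  simp

theorem pvDigs_zero : pvDigs 0 = [] := by rw [pvDigs, pvD2bLoop]; simp

theorem pvDigs_spec (n : Nat) : pvBitsOk (pvDigs n) ∧ pvValR (pvDigs n) = n := by
  induction n using Nat.strong_induction_on with
  | _ n ih =>
    by_cases hn : n = 0
    · subst hn; rw [pvDigs_zero]; exact ⟨by intro c hc; simp at hc, rfl⟩
    · have hlt : n / 2 < n := Nat.div_lt_self (Nat.pos_of_ne_zero hn) (by omega)
      obtain ⟨h1, h2⟩ := ih (n / 2) hlt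
      rw [pvDigs_cons n hn]
      constructor
      · intro c hc
        rcases List.mem_cons.mp hc with rfl | hc
        · split <;> simp
        · exact h1 c hc
      · simp only [pvValR, h2]
        have : n % 2 < 2 := Nat.mod_lt _ (by omega)
        split <;> rename_i hb <;> simp [pvBit] <;> omega

theorem pvDigs_len_le (n : Nat) : ∀ (w : Nat), n < 2 ^ w → 1 ≤ w → (pvDigs n).length ≤ w := by
  induction n using Nat.strong_induction_on with
  | _ n ih =>
    intro w hw h1
    by_cases hn : n = 0
    · subst hn; simp [pvDigs_zero]
    · have hlt : n / 2 < n := Nat.div_lt_self (Nat.pos_of_ne_zero hn) (by omega)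
      rw [pvDigs_cons n hn]
      simp only [List.length_cons]
      by_cases hh : n / 2 = 0
      · rw [hh, pvDigs_zero]; simpa using h1
      · obtain ⟨w', rfl⟩ : ∃ w', w = w' + 1 := ⟨w - 1, by omega⟩
        have hw' : n / 2 < 2 ^ w' := by
          rw [pow_succ] at hw; omega
        have h1' : 1 ≤ w' := by
          by_contra hc
          have : w' = 0 := by omega
          subst this; simp at hw'; omega
        have := ih (n / 2) hlt w' hw' h1'
        omega

theorem pvDigs_ne_nil (n : Nat) (h : n ≠ 0) : pvDigs n ≠ [] := by
  rw [pvDigs_cons n h]; simp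

theorem pvDigs_getLast (n : Nat) : ∀ (_ : n ≠ 0), (pvDigs n).getLast? = some '1' := by
  induction n using Nat.strong_induction_on with
  | _ n ih =>
    intro h
    have hlt : n / 2 < n := Nat.div_lt_self (Nat.pos_of_ne_zero h) (by omega)
    by_cases hh : n / 2 = 0
    · have hn1 : n = 1 := by omega
      subst hn1
      rw [pvDigs_cons 1 (by omega)]
      norm_num [pvDigs_zero]
    · have hne' : pvDigs (n / 2) ≠ [] := pvDigs_ne_nil _ hh
      obtain ⟨x, xs, hx⟩ := List.exists_cons_of_ne_nil hne'
      rw [pvDigs_cons n h, hx, List.getLast?_cons_cons]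
      rw [← hx]
      exact ih (n / 2) hlt hh

theorem pvDigs_len_ge_two (n : Nat) (h : 2 ≤ n) : 2 ≤ (pvDigs n).length := by
  have h2 : n / 2 ≠ 0 := by omega
  rw [pvDigs_cons n (by omega), pvDigs_cons (n / 2) h2]
  simp

-- decimal_to_binary: bits, value n, length = max bl.toNat (minimal length)
theorem pvD2b_spec (n : Nat) (bl : Int) :
    pvBitsOk (decimal_to_binary n bl) ∧ pvVal (decimal_to_binary n bl) = n ∧
      (decimal_to_binary n bl).length
        = max bl.toNat (if n = 0 then 1 else (pvDigs n).length) := by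
  have hone : pvBitsOk ['0'] := by intro c hc; simp at hc; simp [hc]
  unfold decimal_to_binary
  by_cases hn : n = 0
  · subst hn
    simp only [if_pos rfl]
    by_cases hbl : bl = 0
    · subst hbl; simp [hone, pvVal, pvValR, pvBit]
    · obtain ⟨z1, z2, z3⟩ := pvZfill_spec bl ['0'] hone
      simp only [hbl, ite_true, ne_eq, not_false_iff, if_true]
      refine ⟨z1, ?_, ?_⟩
      · rw [z2]; simp [pvVal, pvValR, pvBit]
      · rw [z3]; simp
  · obtain ⟨d1, d2⟩ := pvDigs_spec n
    have hrev : pvBitsOk (pvDigs n).reverse := pvBitsOk_reverse _ d1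
    have hval : pvVal (pvDigs n).reverse = n := by simpa [pvVal] using d2
    have hfold : pvD2bLoop n [] = pvDigs n := rfl
    simp only [hn, ite_false, if_false, hfold]
    by_cases hbl : bl = 0
    · subst hbl; simpa [hn] using ⟨hrev, hval⟩
    · obtain ⟨z1, z2, z3⟩ := pvZfill_spec bl (pvDigs n).reverse hrev
      simp only [hbl, ne_eq, not_false_iff, if_true, ite_true]
      exact ⟨z1, by rw [z2, hval], by rw [z3]; simp⟩

theorem pvToBinLoop_eq (m : Nat) : pvToBinLoop m = (pvDigs m).reverse := by
  induction m using Nat.strong_induction_on with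
  | _ m ih =>
    by_cases hm : m = 0
    · subst hm; rw [pvToBinLoop, pvDigs_zero]; simp
    · have hlt : m / 2 < m := Nat.div_lt_self (Nat.pos_of_ne_zero hm) (by omega)
      rw [pvToBinLoop]
      simp only [hm, dite_false]
      rw [ih (m / 2) hlt, pvDigs_cons m hm]
      simp

theorem pvFix_spec (w : Nat) : ∀ (v : Nat),
    pvBitsOk (pvFix w v) ∧ pvVal (pvFix w v) = v % 2 ^ w ∧ (pvFix w v).length = w := by
  induction w with
  | zero =>
      intro v
      exact ⟨by intro c hc; simp [pvFix] at hc,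
             by simp [pvFix, pvVal, pvValR, Nat.mod_one], rfl⟩
  | succ w ih =>
      intro v
      obtain ⟨h1, h2, h3⟩ := ih (v / 2)
      refine ⟨?_, ?_, ?_⟩
      · intro c hc
        rcases List.mem_append.mp hc with h | h
        · exact h1 c h
        · simp at h; subst h; split <;> simp
      · show pvVal (pvFix w (v / 2) ++ [_]) = _
        rw [pvVal_append, h2]
        have hm2 : v % 2 < 2 := Nat.mod_lt _ (by omega)
        have hv1 : pvVal [if v % 2 = 1 then '1' else '0'] = v % 2 := by
          split <;> rename_i hb <;> simp [pvVal, pvValR, pvBit] <;> omega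
        rw [hv1, pvModPowSucc]
        simp only [List.length_cons, List.length_nil, pow_one]
        omega
      · show (pvFix w (v / 2) ++ [_]).length = _
        simp [h3]

theorem pvAddRun (xs : List Char) : ∀ (ys res : List Char) (c : Nat),
    xs.length = ys.length → c ≤ 1 →
    (xs.zip ys).foldl pvAddStep (res, c)
      = (pvFix xs.length (pvValR xs + pvValR ys + c) ++ res,
         (pvValR xs + pvValR ys + c) / 2 ^ xs.length) := by
  induction xs with
  | nil =>
      intro ys res c hl hc
      cases ys with
      | nil => simp [pvFix, pvValR]
      | cons d ds => simp at hl
  | cons x xs' ih =>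
      intro ys res c hl hc
      cases ys with
      | nil => simp at hl
      | cons y ys' =>
          simp only [List.length_cons] at hl
          have hbx := pvBit_le x
          have hby := pvBit_le y
          have hcarry : (if pvBit x + pvBit y + c ≥ 2 then 1 else 0)
              = (pvBit x + pvBit y + c) / 2 := by split <;> omega
          have hstep : pvAddStep (res, c) (x, y)
              = ((if (pvBit x + pvBit y + c) % 2 = 1 then '1' else '0') :: res,
                 (pvBit x + pvBit y + c) / 2) := by
            simp [pvAddStep, hcarry]
          simp only [List.zip_cons_cons, List.foldl_cons, hstep]
          rw [ih ys' _ ((pvBit x + pvBit y + c) / 2) (by omega) (by omega)]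
          have hV : pvValR (x :: xs') + pvValR (y :: ys') + c
              = 2 * (pvValR xs' + pvValR ys') + (pvBit x + pvBit y + c) := by
            simp [pvValR]; ring
          have hdiv : (pvValR (x :: xs') + pvValR (y :: ys') + c) / 2
              = pvValR xs' + pvValR ys' + (pvBit x + pvBit y + c) / 2 := by omega
          have hmod : (pvValR (x :: xs') + pvValR (y :: ys') + c) % 2
              = (pvBit x + pvBit y + c) % 2 := by omega
          have e1 : pvFix (xs'.length + 1) (pvValR (x :: xs') + pvValR (y :: ys') + c)
              = pvFix xs'.length ((pvValR (x :: xs') + pvValR (y :: ys') + c) / 2)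
                ++ [if (pvValR (x :: xs') + pvValR (y :: ys') + c) % 2 = 1
                    then '1' else '0'] := rfl
          refine Prod.ext ?_ ?_
          · show pvFix xs'.length (pvValR xs' + pvValR ys' + (pvBit x + pvBit y + c) / 2)
                ++ (if (pvBit x + pvBit y + c) % 2 = 1 then '1' else '0') :: res
              = pvFix (xs'.length + 1) (pvValR (x :: xs') + pvValR (y :: ys') + c) ++ res
            rw [e1, hdiv, hmod, List.append_assoc, List.singleton_append]
          · show (pvValR xs' + pvValR ys' + (pvBit x + pvBit y + c) / 2) / 2 ^ xs'.length
              = (pvValR (x :: xs') + pvValR (y :: ys') + c) / 2 ^ (xs'.length + 1)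
            rw [pow_succ, mul_comm, ← Nat.div_div_eq_div_mul, hdiv]

theorem pvZfill_val (k : Int) (s : List Char) : pvVal (pvZfill k s) = pvVal s := by
  unfold pvZfill
  rw [pvVal_append]
  have : pvVal (List.replicate (k.toNat - s.length) '0') = 0 := by
    simp [pvVal, List.reverse_replicate, pvValR_replicate_zero]
  rw [this]; ring

theorem pvZfill_len (k : Int) (s : List Char) :
    (pvZfill k s).length = max k.toNat s.length := by
  unfold pvZfill
  simp [List.length_append, List.length_replicate]
  omega

theorem pvBinary_add_run (a b : List Char) :
    binary_add a b
      = (if (pvVal a + pvVal b) / 2 ^ max a.length b.length ≠ 0 then ['1'] else [])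
        ++ pvFix (max a.length b.length) (pvVal a + pvVal b) := by
  have hla : (pvZfill ((max a.length b.length : Nat) : Int) a).length = max a.length b.length := by
    rw [pvZfill_len]; omega
  have hlb : (pvZfill ((max a.length b.length : Nat) : Int) b).length = max a.length b.length := by
    rw [pvZfill_len]; omega
  have hva : pvValR (pvZfill ((max a.length b.length : Nat) : Int) a).reverse = pvVal a := by
    show pvVal _ = _; rw [pvZfill_val]
  have hvb : pvValR (pvZfill ((max a.length b.length : Nat) : Int) b).reverse = pvVal b := by
    show pvVal _ = _; rw [pvZfill_val]
  unfold binary_add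
  dsimp only
  rw [pvAddRun _ _ _ 0 (by simp only [List.length_reverse, pvZfill_len, Int.toNat_natCast]; omega) (by omega)]
  simp only [List.length_reverse, hla, hva, hvb, Nat.add_zero, List.append_nil]
  split <;> simp

theorem pvBinary_add_spec (a b : List Char) (ha : pvBitsOk a) (hb : pvBitsOk b) :
    pvBitsOk (binary_add a b) ∧ pvVal (binary_add a b) = pvVal a + pvVal b ∧
      (binary_add a b).length
        = if pvVal a + pvVal b < 2 ^ max a.length b.length
          then max a.length b.length else max a.length b.length + 1 := by
  set w := max a.length b.length with hw
  set S := pvVal a + pvVal b with hS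
  have hSlt : S < 2 ^ w + 2 ^ w := by
    have h1 : pvVal a < 2 ^ w :=
      lt_of_lt_of_le (pvVal_lt a) (Nat.pow_le_pow_right (by omega) (le_max_left _ _))
    have h2 : pvVal b < 2 ^ w :=
      lt_of_lt_of_le (pvVal_lt b) (Nat.pow_le_pow_right (by omega) (le_max_right _ _))
    omega
  obtain ⟨f1, f2, f3⟩ := pvFix_spec w S
  rw [pvBinary_add_run a b, ← hw, ← hS]
  by_cases hc : S / 2 ^ w = 0
  · have hlt : S < 2 ^ w := pvDivPowZero S w hc
    rw [if_neg (by omega), List.nil_append]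
    refine ⟨f1, ?_, ?_⟩
    · rw [f2]; exact Nat.mod_eq_of_lt hlt
    · rw [f3, if_pos hlt]
  · have hge : 2 ^ w ≤ S := by
      by_contra hcon
      exact hc (Nat.div_eq_of_lt (by omega))
    have hmod : S % 2 ^ w = S - 2 ^ w := by
      rw [Nat.mod_eq_sub_mod hge]
      exact Nat.mod_eq_of_lt (by omega)
    rw [if_pos hc, List.singleton_append]
    refine ⟨?_, ?_, ?_⟩
    · intro c hc'
      rcases List.mem_cons.mp hc' with rfl | hc'
      · right; rfl
      · exact f1 c hc'
    · rw [pvVal_cons, f2, f3, hmod]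
      simp [pvBit]
      omega
    · simp only [List.length_cons, f3]
      rw [if_neg (by omega)]

theorem pvBinary_add_len_ge (a b : List Char) :
    max a.length b.length ≤ (binary_add a b).length := by
  obtain ⟨-, -, f3⟩ := pvFix_spec (max a.length b.length) (pvVal a + pvVal b)
  rw [pvBinary_add_run a b]
  simp only [List.length_append, f3]
  omega

theorem pvBitsOk_append (xs ys : List Char) (hx : pvBitsOk xs) (hy : pvBitsOk ys) :
    pvBitsOk (xs ++ ys) := by
  intro c hc
  rcases List.mem_append.mp hc with h | h
  · exact hx c h
  · exact hy c h

theorem pvBitsOk_replicate (m : Nat) : pvBitsOk (List.replicate m '0') := by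
  intro c hc; left; exact List.eq_of_mem_replicate hc

theorem pvVal_replicate_zero (m : Nat) : pvVal (List.replicate m '0') = 0 := by
  simp [pvVal, List.reverse_replicate, pvValR_replicate_zero]

theorem pvMulLoop_spec (ma : List Char) (hma : pvBitsOk ma) :
    ∀ (rb : List Char) (shift : Nat) (p : List Char), pvBitsOk p → pvBitsOk rb →
    pvBitsOk (pvMulLoop ma rb shift p) ∧
      pvVal (pvMulLoop ma rb shift p) = pvVal p + pvVal ma * pvValR rb * 2 ^ shift := by
  intro rb
  induction rb with
  | nil => intro shift p hp _; simp [pvMulLoop, pvValR, hp]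
  | cons c cs ih =>
      intro shift p hp hrb
      have hcs : pvBitsOk cs := fun x hx => hrb x (by simp [hx])
      have hc : c = '0' ∨ c = '1' := hrb c (by simp)
      show pvBitsOk (pvMulLoop ma cs (shift + 1) _) ∧
        pvVal (pvMulLoop ma cs (shift + 1) _) = _
      by_cases h1 : c = '1'
      · rw [if_pos h1]
        have hpart : pvBitsOk (ma ++ List.replicate shift '0') :=
          pvBitsOk_append _ _ hma (pvBitsOk_replicate shift)
        obtain ⟨b1, b2, -⟩ := pvBinary_add_spec p (ma ++ List.replicate shift '0') hp hpart
        have hval : pvVal (binary_add p (ma ++ List.replicate shift '0'))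
            = pvVal p + pvVal ma * 2 ^ shift := by
          rw [b2, pvVal_append, pvVal_replicate_zero, List.length_replicate]
          ring
        obtain ⟨r1, r2⟩ := ih (shift + 1) _ b1 hcs
        refine ⟨r1, ?_⟩
        rw [r2, hval, h1]
        have hb1 : pvBit '1' = 1 := rfl
        simp only [pvValR, hb1, pow_succ]
        ring
      · have hc0 : c = '0' := by rcases hc with h | h; exact h; exact absurd h h1
        rw [if_neg h1]
        obtain ⟨r1, r2⟩ := ih (shift + 1) p hp hcs
        refine ⟨r1, ?_⟩
        rw [r2, hc0]
        have hb0 : pvBit '0' = 0 := rfl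
        simp only [pvValR, hb0, pow_succ]
        ring

theorem pvMulLoop_len_ge (ma : List Char) : ∀ (rb : List Char) (shift : Nat) (p : List Char),
    p.length ≤ (pvMulLoop ma rb shift p).length := by
  intro rb
  induction rb with
  | nil => intro shift p; simp [pvMulLoop]
  | cons c cs ih =>
      intro shift p
      show p.length ≤ (pvMulLoop ma cs (shift + 1) _).length
      by_cases h1 : c = '1'
      · simp only [if_pos h1]
        refine le_trans ?_ (ih (shift + 1) _)
        exact le_trans (le_max_left _ _) (pvBinary_add_len_ge p _)
      · simp only [if_neg h1]
        exact ih (shift + 1) p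

theorem pvMulLoop_len_last (ma : List Char) : ∀ (rb : List Char) (shift : Nat) (p : List Char),
    rb.getLast? = some '1' →
    ma.length + shift + rb.length - 1 ≤ (pvMulLoop ma rb shift p).length := by
  intro rb
  induction rb with
  | nil => intro shift p h; simp at h
  | cons c cs ih =>
      intro shift p hlast
      cases cs with
      | nil =>
          simp only [List.getLast?_singleton, Option.some_inj] at hlast
          subst hlast
          show ma.length + shift + 1 - 1 ≤ (pvMulLoop ma [] (shift + 1) _).length
          simp only [reduceIte, pvMulLoop]
          have h1 := pvBinary_add_len_ge p (ma ++ List.replicate shift '0')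
          simp only [List.length_append, List.length_replicate] at h1
          omega
      | cons c' cs' =>
          rw [List.getLast?_cons_cons] at hlast
          have := ih (shift + 1) (if c = '1' then binary_add p (ma ++ List.replicate shift '0') else p) hlast
          show ma.length + shift + (cs'.length + 1 + 1) - 1 ≤ (pvMulLoop ma (c' :: cs') (shift + 1) _).length
          simp only [List.length_cons] at this
          omega

-- the truncated tail of a bit string: last w bits = value mod 2^w
theorem pvVal_drop (s : List Char) (k : Nat) (hk : k ≤ s.length) :
    pvVal (s.drop k) = pvVal s % 2 ^ (s.length - k) := by
  have hsplit : s = s.take k ++ s.drop k := (List.take_append_drop k s).symm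
  have hlen : (s.drop k).length = s.length - k := List.length_drop ..
  have hv : pvVal s = pvVal (s.take k) * 2 ^ (s.length - k) + pvVal (s.drop k) := by
    conv_lhs => rw [hsplit]
    rw [pvVal_append, hlen]
  have hlt : pvVal (s.drop k) < 2 ^ (s.length - k) := by
    have := pvVal_lt (s.drop k); rwa [hlen] at this
  rw [hv, Nat.mul_comm, Nat.mul_add_mod, Nat.mod_eq_of_lt hlt]

theorem pvBitsOk_drop (s : List Char) (k : Nat) (hs : pvBitsOk s) : pvBitsOk (s.drop k) :=
  fun c hc => hs c (List.drop_subset k s hc)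

-- the common normal form of both tails for bit_length ≥ 2
theorem pvSignEq (a b : Int) :
    (if (if 0 ≤ a then '0' else '1') = (if 0 ≤ b then '0' else '1') then '0' else '1')
      = (if (decide (0 ≤ a)) = (decide (0 ≤ b)) then '0' else '1') := by
  by_cases ha : 0 ≤ a <;> by_cases hb : 0 ≤ b <;> simp [ha, hb]

theorem pvFormatB_spec (m w : Nat) (hm : m < 2 ^ w) (hw : 1 ≤ w) :
    pvBitsOk (pvFormatB m) ∧ pvVal (pvFormatB m) = m ∧ (pvFormatB m).length ≤ w := by
  unfold pvFormatB
  by_cases hm0 : m = 0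
  · subst hm0
    simp only [if_pos rfl]
    refine ⟨?_, by simp [pvVal, pvValR, pvBit], by simpa using hw⟩
    intro c hc; simp at hc; simp [hc]
  · obtain ⟨d1, d2⟩ := pvDigs_spec m
    simp only [if_neg hm0, pvToBinLoop_eq]
    exact ⟨pvBitsOk_reverse _ d1, by simpa [pvVal] using d2,
           by simpa using pvDigs_len_le m w hm hw⟩

-- the B-side tail: fixed facts about zfill (pvFormatB m)
theorem pvAltTail_spec (m : Nat) (wI : Int) (hm : m < 2 ^ wI.toNat) (hw : 1 ≤ wI.toNat) :
    pvBitsOk (pvZfill wI (pvFormatB m)) ∧ pvVal (pvZfill wI (pvFormatB m)) = m ∧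
      (pvZfill wI (pvFormatB m)).length = wI.toNat := by
  obtain ⟨f1, f2, f3⟩ := pvFormatB_spec m wI.toNat hm hw
  obtain ⟨z1, -, -⟩ := pvZfill_spec wI (pvFormatB m) f1
  refine ⟨z1, by rw [pvZfill_val, f2], ?_⟩
  rw [pvZfill_len]
  omega

-- ===== VERDICT (by name: the statement is the Claim_ definition above) =====
set_option maxHeartbeats 4000000 in
theorem multiply_in_direct_code_spec : Claim_unchanged_multiply_in_direct_code := by
  unfold Claim_unchanged_multiply_in_direct_code
  intro a b bl _ hPre
  unfold Spec_multiply_in_direct_code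
  intro hnD
  unfold Pre_multiply_in_direct_code at hPre
  by_cases hbl1 : bl = 1
  · -- bit_length = 1 and ¬D: b = 0, or a = 0 and b = ±1; both sides are sign + "0"
    subst hbl1
    have hcase : b = 0 ∨ (a = 0 ∧ (b = 1 ∨ b = -1)) := by
      by_cases hb0 : b = 0
      · exact Or.inl hb0
      · right
        by_contra hcon
        exact hnD ⟨rfl, hb0, hcon⟩
    rcases hcase with rfl | ⟨rfl, hb⟩
    · -- b = 0: the loop never adds, both tails are ['0']
      unfold multiply_in_direct_code multiply_in_direct_code_alt
      dsimp only
      rw [pvSignEq a 0]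
      have hmb : decimal_to_binary (Int.natAbs 0) ((1:Int) - 1) = ['0'] := rfl
      rw [hmb]
      have hloop : pvMulLoop (decimal_to_binary a.natAbs ((1:Int) - 1)) (['0'].reverse) 0 ['0']
          = ['0'] := by simp [pvMulLoop]
      rw [hloop]
      have hif : ((['0'].length : Int) > (1:Int) - 1) := by norm_num
      rw [if_pos hif]
      have h0 : -((1:Int) - 1) = 0 := by norm_num
      rw [h0, PySem.List.slice_zero_start, PySem.List.slice_none_none]
      have hm0 : a.natAbs * (Int.natAbs 0) % 2 ^ ((1:Int) - 1).toNat = 0 := by simp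
      rw [hm0]
      rfl
    · -- a = 0, b = ±1: both sides are closed terms
      rcases hb with rfl | rfl <;>
        · show multiply_in_direct_code 0 _ 1 = multiply_in_direct_code_alt 0 _ 1
          simp [multiply_in_direct_code, multiply_in_direct_code_alt, decimal_to_binary,
                pvD2bLoop, pvZfill, binary_add, pvMulLoop, pvAddStep, pvBit, pvFormatB,
                pvToBinLoop, pysem]
  · -- bit_length ≥ 2: both tails have length w and value (|a|·|b|) mod 2^w
    have hbl2 : 2 ≤ bl := by omega
    have hw0 : (0:Int) ≤ bl - 1 := by omega
    have hwcast : bl - 1 = (((bl - 1).toNat : Nat) : Int) := (Int.toNat_of_nonneg hw0).symm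
    have hw1 : 1 ≤ (bl - 1).toNat := by omega
    unfold multiply_in_direct_code multiply_in_direct_code_alt
    dsimp only
    rw [pvSignEq a b]
    set ma := decimal_to_binary a.natAbs (bl - 1) with hma_def
    set mb := decimal_to_binary b.natAbs (bl - 1) with hmb_def
    set prod := pvMulLoop ma mb.reverse 0 ['0'] with hprod_def
    obtain ⟨ma1, ma2, -⟩ := pvD2b_spec a.natAbs (bl - 1)
    obtain ⟨mb1, mb2, -⟩ := pvD2b_spec b.natAbs (bl - 1)
    rw [← hma_def] at ma1 ma2
    rw [← hmb_def] at mb1 mb2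
    have h0bits : pvBitsOk ['0'] := by intro c hc; simp at hc; simp [hc]
    obtain ⟨p1, p2⟩ := pvMulLoop_spec ma ma1 mb.reverse 0 ['0'] h0bits (pvBitsOk_reverse _ mb1)
    rw [← hprod_def] at p1 p2
    have hvprod : pvVal prod = a.natAbs * b.natAbs := by
      rw [p2]
      have h1 : pvVal ['0'] = 0 := rfl
      have h2 : pvValR mb.reverse = pvVal mb := rfl
      rw [h1, h2, mb2, ma2]
      ring
    have hmlt : a.natAbs * b.natAbs % 2 ^ (bl - 1).toNat < 2 ^ (bl - 1).toNat :=
      Nat.mod_lt _ (Nat.two_pow_pos _)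
    obtain ⟨t1, t2, t3⟩ := pvAltTail_spec (a.natAbs * b.natAbs % 2 ^ (bl - 1).toNat)
      (bl - 1) hmlt hw1
    congr 1
    congr 1
    by_cases hlen : ((prod.length : Int) > bl - 1)
    · rw [if_pos hlen]
      have hlw : (bl - 1).toNat < prod.length := by omega
      have hsl : PySem.List.slice prod (some (-(bl - 1))) none
          = prod.drop (prod.length - (bl - 1).toNat) := by
        rw [hwcast]
        exact PySem.List.slice_from_neg_natCast prod ((bl - 1).toNat) (by omega)
      rw [hsl]
      have hke : prod.length - (prod.length - (bl - 1).toNat) = (bl - 1).toNat := by omega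
      apply pvVal_ext
      · exact pvBitsOk_drop prod _ p1
      · exact t1
      · rw [List.length_drop, t3]; omega
      · rw [pvVal_drop prod _ (by omega), hke, hvprod, t2]
    · rw [if_neg hlen]
      have hlenle : prod.length ≤ (bl - 1).toNat := by omega
      obtain ⟨z1, -, -⟩ := pvZfill_spec (bl - 1) prod p1
      have hPlt : a.natAbs * b.natAbs < 2 ^ (bl - 1).toNat := by
        have := pvVal_lt prod
        rw [hvprod] at this
        exact lt_of_lt_of_le this (Nat.pow_le_pow_right (by omega) hlenle)
      apply pvVal_ext
      · exact z1
      · exact t1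
      · rw [pvZfill_len, t3]; omega
      · rw [pvZfill_val, hvprod, t2, Nat.mod_eq_of_lt hPlt]

set_option maxHeartbeats 1000000 in
theorem multiply_in_direct_code_changed : Claim_changed_multiply_in_direct_code := by
  unfold Claim_changed_multiply_in_direct_code
  refine ⟨by decide, by decide, by decide, ?_, ?_, by decide⟩
  · show multiply_in_direct_code 3 2 1 = "0110"
    simp [multiply_in_direct_code, decimal_to_binary, pvD2bLoop, pvZfill, binary_add, pvMulLoop,
          pvAddStep, pvBit, pysem]
    rfl
  · show multiply_in_direct_code_alt 3 2 1 = "00"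
    simp [multiply_in_direct_code_alt, pvFormatB, pvZfill]
    rfl


set_option maxHeartbeats 1000000 in
theorem multiply_in_direct_code_tight : Claim_exact_multiply_in_direct_code := by
  unfold Claim_exact_multiply_in_direct_code
  intro a b bl _ _ hD heq
  obtain ⟨hbl, hb0, hnab⟩ := hD
  subst hbl
  unfold multiply_in_direct_code multiply_in_direct_code_alt at heq
  dsimp only at heq
  rw [pvSignEq a b] at heq
  set ma := decimal_to_binary a.natAbs ((1:Int) - 1) with hma_def
  set mb := decimal_to_binary b.natAbs ((1:Int) - 1) with hmb_def
  set prod := pvMulLoop ma mb.reverse 0 ['0'] with hprod_def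
  -- the B tail is ['0']
  have htailB : pvZfill ((1:Int) - 1)
      (pvFormatB (a.natAbs * b.natAbs % 2 ^ ((1:Int) - 1).toNat)) = ['0'] := by
    have hm0 : a.natAbs * b.natAbs % 2 ^ ((1:Int) - 1).toNat = 0 := by
      norm_num [Nat.mod_one]
    rw [hm0]
    rfl
  rw [htailB] at heq
  -- the A branch keeps the whole product
  have hlen1 : 1 ≤ prod.length := by
    have := pvMulLoop_len_ge ma mb.reverse 0 ['0']
    simpa using this
  rw [if_pos (by push_cast; omega : ((prod.length : Int) > (1:Int) - 1))] at heq
  have hslice : PySem.List.slice prod (some (-((1:Int) - 1))) none = prod := by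
    have h0 : -((1:Int) - 1) = 0 := by norm_num
    rw [h0, PySem.List.slice_zero_start, PySem.List.slice_none_none]
  rw [hslice] at heq
  have hlist := String.ofList_inj.mp heq
  have hprodeq : prod = ['0'] := (List.cons_inj_right _).mp hlist
  obtain ⟨ma1, ma2, ma3⟩ := pvD2b_spec a.natAbs ((1:Int) - 1)
  obtain ⟨mb1, mb2, -⟩ := pvD2b_spec b.natAbs ((1:Int) - 1)
  rw [← hma_def] at ma1 ma2 ma3
  rw [← hmb_def] at mb1 mb2
  have h0bits : pvBitsOk ['0'] := by intro c hc; simp at hc; simp [hc]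
  by_cases ha0 : a = 0
  · -- a = 0 forces |b| ≥ 2, so the final add makes the product at least 2 chars long
    have hb2 : 2 ≤ b.natAbs := by
      have : ¬(b = 1 ∨ b = -1) := fun h => hnab ⟨ha0, h⟩
      omega
    have hmb_digs : mb = (pvDigs b.natAbs).reverse := by
      rw [hmb_def]
      have hnb : b.natAbs ≠ 0 := by omega
      simp [decimal_to_binary, hnb, pvDigs]
    have hlast : (mb.reverse).getLast? = some '1' := by
      rw [hmb_digs, List.reverse_reverse]
      exact pvDigs_getLast b.natAbs (by omega)
    have hlen2 := pvMulLoop_len_last ma mb.reverse 0 ['0'] hlast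
    have hma1 : ma.length = 1 := by
      rw [hma_def, ha0]
      rfl
    have hmbl : 2 ≤ mb.reverse.length := by
      rw [hmb_digs, List.reverse_reverse]
      exact pvDigs_len_ge_two _ hb2
    rw [← hprod_def] at hlen2
    rw [hprodeq] at hlen2
    simp only [List.length_cons, List.length_nil] at hlen2
    omega
  · -- a ≠ 0 and b ≠ 0: the product has a positive value, ['0'] has value 0
    obtain ⟨-, p2⟩ := pvMulLoop_spec ma ma1 mb.reverse 0 ['0'] h0bits (pvBitsOk_reverse _ mb1)
    rw [← hprod_def, hprodeq] at p2
    have hz : pvVal ['0'] = 0 := rfl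
    have h2 : pvValR mb.reverse = pvVal mb := rfl
    rw [hz, h2, mb2, ma2] at p2
    have hna : a.natAbs ≠ 0 := by omega
    have hnb : b.natAbs ≠ 0 := by omega
    have : a.natAbs * b.natAbs ≠ 0 := Nat.mul_ne_zero hna hnb
    simp at p2
    omega
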